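-- pv_equiv track=rewrite | github.com/Imsunwoo-hub/- | programmers/Solution_숫자야구.py | solution
-- ===== SOURCE A (Python) =====
-- def solution(baseball):
--     answer = 0
--     temp = []
--     baseball_temp  = []
--     for i in baseball :
--         baseball_temp.append(str(i[0]))
--
--     for i in range(123, 988) :
--         s = str(i)
--         s = list(j for j in s)
--         count = 0
--         if '0' in s :
--             continue
--         for j in s :
--             if s.count(j) >= 2 :
--                 count = 1
--                 break
--         if count == 0 :
--             temp.append(str(i))
--
--     for i in temp :
--         result = []
--         c = 0
--         for j in range(0,len(baseball_temp)) :
--             strike = 0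
--             ball = 0
--             re = []
--             t = list(a for a in baseball_temp[j])
--             for k in range(0, len(i)) :
--                 if i[k] == t[k] :
--                     strike += 1
--                 elif i[k] != t[k] and i[k] in t :
--                     ball += 1
--             re.append(strike)
--             re.append(ball)
--             result.append(re)
--         for j in range(0, len(result)):
--             if result[j][0] == baseball[j][1] and result[j][1] == baseball[j][2] :
--                 c = c + 1
--         if c == len(baseball) :
--             answer += 1
--     return answer
-- ===== SOURCE B (Python) =====
-- def gen(t, s, b):
--     # All 3-digit candidates (distinct digits 1-9) consistent with the single hint
--     # (guess string t, s strikes, b balls), built constructively: pick a category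
--     # pattern (Strike/Ball/Other per position) with the right counts, then assign
--     # digits position by position under that pattern.
--     digits = "123456789"
--     pos = (t[0], t[1], t[2])  # the three guessed positions
--     res = set()
--     for pat in (x + y + z for x in "SBO" for y in "SBO" for z in "SBO"):
--         if pat.count("S") != s or pat.count("B") != b:
--             continue
--         partials = [""]
--         for p in range(3):
--             k = pat[p]
--             if k == "S":
--                 partials = [c + pos[p] for c in partials if pos[p] in digits and pos[p] not in c]
--             elif k == "B":
--                 partials = [c + d for c in partials for d in digits
--                             if d in t and d != pos[p] and d not in c]
--             else:
--                 partials = [c + d for c in partials for d in digits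
--                             if d not in t and d not in c]
--         res.update(partials)
--     return res
--
--
-- def solution(baseball):
--     cands = None
--     for q in baseball:
--         cur = gen(str(q[0]), q[1], q[2])
--         cands = cur if cands is None else cands & cur
--     return 9 * 8 * 7 if cands is None else len(cands)
-- ===== Notes on version B (the rewrite author's own statement) =====
-- stated objective: faster
-- what changed: B never enumerates-and-tests candidate numbers: for each hint it CONSTRUCTS the set of consistent candidates directly (choose a strike/ball/other category pattern with the hinted counts, then assign digits per position under that pattern) and intersects these per-hint sets, returning the intersection's size (9*8*7 for no hints); A brute-forces all of range(123,988) and rechecks every hint against every survivor.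
-- outside the precondition, e.g. on solution([[-47, 75], [-47, 75]]): A returns 0, B raises IndexError
import Mathlib
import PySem

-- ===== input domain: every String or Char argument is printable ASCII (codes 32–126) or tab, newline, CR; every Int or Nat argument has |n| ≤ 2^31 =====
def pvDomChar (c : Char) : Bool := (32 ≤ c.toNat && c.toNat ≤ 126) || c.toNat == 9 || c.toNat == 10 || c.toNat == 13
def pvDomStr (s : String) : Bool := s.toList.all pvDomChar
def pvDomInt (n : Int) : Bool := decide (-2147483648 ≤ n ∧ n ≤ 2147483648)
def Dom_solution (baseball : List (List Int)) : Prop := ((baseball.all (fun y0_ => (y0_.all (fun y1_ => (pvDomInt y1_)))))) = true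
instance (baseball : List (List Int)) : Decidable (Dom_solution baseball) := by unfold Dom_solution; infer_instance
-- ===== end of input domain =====

-- B never enumerates-and-tests candidate numbers: per hint it CONSTRUCTS the consistent candidate
-- set (category pattern + per-position digit assignment) and intersects the per-hint sets
-- (measured faster in a timing run). Candidate strings are List Char (PySem-style strings).

-- ===== PORT A =====
-- str(i[0]) for each row i (A's first loop, an append-fold)
def pvA_bt (baseball : List (List Int)) : List (List Char) :=
  baseball.foldl (fun acc i => acc ++ [PySem.Int.toChars (PySem.List.pyGetD i 0 0)]) []

-- A's second loop: numbers 123..987 whose digit string has no '0' and no repeated digit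
def pvA_temp : List (List Char) :=
  (PySem.List.pyRange 123 988 1).foldl (fun acc i =>
    let s := PySem.Int.toChars i
    if s.contains '0' then acc
    else
      -- for j in s: if s.count(j) >= 2: count = 1; break
      let count : Int := if s.any (fun j => 2 ≤ PySem.List.count s j) then 1 else 0
      if count = 0 then acc ++ [s] else acc) []

-- A's innermost loop: (strike, ball) of candidate i against guess string t
def pvA_sb (i t : List Char) : Int × Int :=
  (PySem.List.pyRange 0 (PySem.List.len i) 1).foldl (fun (p : Int × Int) k =>
    let ik := PySem.List.pyGetD i k ' '
    let tk := PySem.List.pyGetD t k ' '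
    if ik = tk then (p.1 + 1, p.2)
    else if ik ≠ tk ∧ t.contains ik then (p.1, p.2 + 1) else p) (0, 0)

-- A's result list for candidate i
def pvA_result (bt : List (List Char)) (i : List Char) : List (List Int) :=
  (PySem.List.pyRange 0 (PySem.List.len bt) 1).foldl (fun res j =>
    let t := PySem.List.pyGetD bt j []
    let sb := pvA_sb i t
    res ++ [[sb.1, sb.2]]) []

-- A's c-counting loop
def pvA_c (baseball : List (List Int)) (result : List (List Int)) : Int :=
  (PySem.List.pyRange 0 (PySem.List.len result) 1).foldl (fun c j =>
    let rj := PySem.List.pyGetD result j []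
    let bj := PySem.List.pyGetD baseball j []
    if PySem.List.pyGetD rj 0 0 = PySem.List.pyGetD bj 1 0 ∧
       PySem.List.pyGetD rj 1 0 = PySem.List.pyGetD bj 2 0 then c + 1 else c) 0

def solution (baseball : List (List Int)) : Int :=
  let baseball_temp := pvA_bt baseball
  pvA_temp.foldl (fun answer i =>
    if pvA_c baseball (pvA_result baseball_temp i) = PySem.List.len baseball
    then answer + 1 else answer) 0

-- ===== PORT B =====
def pvDigitsB : List Char := ['1','2','3','4','5','6','7','8','9']  -- "123456789"

-- (x + y + z for x in "SBO" for y in "SBO" for z in "SBO")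
def pvPats : List (List Char) :=
  ['S','B','O'].flatMap (fun x => ['S','B','O'].flatMap (fun y => ['S','B','O'].map (fun z => [x,y,z])))

-- body of gen's 'for p in range(3)' loop: extend every partial candidate at position p.
-- Source B reads pos = (t[0], t[1], t[2]) up front and uses pos[p]; pos[p] = t[p] is ported as
-- PySem.List.pyGetD t p ' ' (exact for 0 ≤ p < 3 whenever len(t) ≥ 3; shorter guesses raise
-- in Python and lie outside Pre_solution).
def pvGenStep (t pat : List Char) (partials : List (List Char)) (p : Int) : List (List Char) :=
  let k := PySem.List.pyGetD pat p ' '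
  let tp := PySem.List.pyGetD t p ' '
  if k = 'S' then
    partials.flatMap (fun c => if tp ∈ pvDigitsB ∧ tp ∉ c then [c ++ [tp]] else [])
  else if k = 'B' then
    partials.flatMap (fun c => pvDigitsB.flatMap (fun d =>
      if d ∈ t ∧ d ≠ tp ∧ d ∉ c then [c ++ [d]] else []))
  else
    partials.flatMap (fun c => pvDigitsB.flatMap (fun d =>
      if d ∉ t ∧ d ∉ c then [c ++ [d]] else []))

-- body of gen's outer 'for pat in …' loop (continue on count mismatch, else res.update(partials))
def pvGenStepOuter (t : List Char) (s b : Int) (res : PySem.Set (List Char)) (pat : List Char) :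
    PySem.Set (List Char) :=
  if PySem.List.count pat 'S' ≠ s ∨ PySem.List.count pat 'B' ≠ b then res
  else PySem.Set.update res ((PySem.List.pyRange 0 3 1).foldl (pvGenStep t pat) [[]])

-- gen(t, s, b): the set of candidates consistent with one hint, built constructively
def pvGen (t : List Char) (s b : Int) : PySem.Set (List Char) :=
  pvPats.foldl (pvGenStepOuter t s b) PySem.Set.empty

-- body of solution's loop: cands = cur if cands is None else cands & cur
def pvB_step (acc : Option (PySem.Set (List Char))) (q : List Int) :
    Option (PySem.Set (List Char)) :=
  let cur := pvGen (PySem.Int.toChars (PySem.List.pyGetD q 0 0))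
                   (PySem.List.pyGetD q 1 0) (PySem.List.pyGetD q 2 0)
  match acc with
  | none => some cur
  | some s => some (PySem.Set.inter s cur)

def solution_alt (baseball : List (List Int)) : Int :=
  match baseball.foldl pvB_step none with
  | none => 9 * 8 * 7
  | some s => PySem.Set.len s

-- ===== PRECONDITION & SPEC =====
-- Pre_ excludes rows with fewer than 3 entries and rows whose first entry's decimal string
-- has fewer than 3 characters: A raises IndexError on these, except that on a short row A can
-- still return by and-short-circuit when the strike count never matches, an accidental value
-- on malformed queries that B (which reads every row's three fields up front) does not reproduce.
def Pre_solution (baseball : List (List Int)) : Prop :=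
  ∀ r ∈ baseball, 3 ≤ r.length ∧ 3 ≤ (PySem.Int.toChars (PySem.List.pyGetD r 0 0)).length
instance (baseball : List (List Int)) : Decidable (Pre_solution baseball) := by
  unfold Pre_solution; infer_instance

def pvWitness_solution : List (List Int) := [[123, 1, 1]]

def Spec_solution (baseball : List (List Int)) (out : Int) : Prop := out = solution_alt baseball
instance (baseball : List (List Int)) (out : Int) : Decidable (Spec_solution baseball out) := by
  unfold Spec_solution; infer_instance

-- ===== CLAIM (what is proved, stated in full; the proofs are below) =====
def Claim_equal_solution : Prop := ∀ (baseball : List (List Int)), Dom_solution baseball → Pre_solution baseball → Spec_solution baseball (solution baseball)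

-- ===== LEMMAS AND PROOFS =====

-- the guess string of a row
def pvG (r : List Int) : List Char := PySem.Int.toChars (PySem.List.pyGetD r 0 0)

-- A's acceptance of candidate c for row r
def pvOK (bb : List (List Int)) (c : List Char) : Bool :=
  bb.all (fun r => decide ((pvA_sb c (pvG r)).1 = PySem.List.pyGetD r 1 0 ∧
                           (pvA_sb c (pvG r)).2 = PySem.List.pyGetD r 2 0))

theorem pv_bt_eq (baseball : List (List Int)) : pvA_bt baseball = baseball.map pvG := by
  unfold pvA_bt
  rw [PySem.List.foldl_append_singleton_eq_map]
  simp [pvG]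

theorem pv_result_eq (bt : List (List Char)) (i : List Char) :
    pvA_result bt i = bt.map (fun t => [(pvA_sb i t).1, (pvA_sb i t).2]) := by
  unfold pvA_result
  rw [PySem.List.len_eq,
    PySem.List.foldl_pyRange_zero_pyGetD' bt []
      (fun res t => res ++ [[(pvA_sb i t).1, (pvA_sb i t).2]]) []]
  simpa using PySem.List.foldl_append_singleton_eq_map
    (fun t => [(pvA_sb i t).1, (pvA_sb i t).2]) bt []

theorem pv_c_eq (baseball : List (List Int)) (f : List Int → List Int) :
    pvA_c baseball (baseball.map f) =
      (baseball.countP (fun r => decide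
        (PySem.List.pyGetD (f r) 0 0 = PySem.List.pyGetD r 1 0 ∧
         PySem.List.pyGetD (f r) 1 0 = PySem.List.pyGetD r 2 0)) : Int) := by
  unfold pvA_c
  rw [PySem.List.len_eq, List.length_map]
  have hcongr : ((PySem.List.pyRange 0 (baseball.length : Int) 1).foldl (fun c j =>
      let rj := PySem.List.pyGetD (baseball.map f) j []
      let bj := PySem.List.pyGetD baseball j []
      if PySem.List.pyGetD rj 0 0 = PySem.List.pyGetD bj 1 0 ∧
         PySem.List.pyGetD rj 1 0 = PySem.List.pyGetD bj 2 0 then c + 1 else c) 0)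
      = ((PySem.List.pyRange 0 (baseball.length : Int) 1).foldl (fun c j =>
        (fun (c : Int) (r : List Int) =>
          if (fun r => decide
              (PySem.List.pyGetD (f r) 0 0 = PySem.List.pyGetD r 1 0 ∧
               PySem.List.pyGetD (f r) 1 0 = PySem.List.pyGetD r 2 0)) r = true
          then c + 1 else c) c (PySem.List.pyGetD baseball j [])) 0) := by
    apply PySem.List.foldl_congr_mem
    intro acc j hj
    rw [PySem.List.mem_pyRange_one] at hj
    have h1 : j < ((baseball.map f).length : Int) := by simpa using hj.2
    rw [PySem.List.pyGetD_eq_getElem (baseball.map f) [] hj.1 h1,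
        PySem.List.pyGetD_eq_getElem baseball [] hj.1 (by simpa using hj.2)]
    simp
  rw [hcongr]
  refine Eq.trans (PySem.List.foldl_pyRange_zero_pyGetD' baseball []
    (fun (c : Int) (r : List Int) =>
      if (fun r => decide
          (PySem.List.pyGetD (f r) 0 0 = PySem.List.pyGetD r 1 0 ∧
           PySem.List.pyGetD (f r) 1 0 = PySem.List.pyGetD r 2 0)) r = true
      then c + 1 else c) 0) ?_
  rw [PySem.List.foldl_count_if]
  simp

-- A's per-candidate acceptance is pvOK
theorem pv_cond_iff (bb : List (List Int)) (c : List Char) :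
    (pvA_c bb (pvA_result (pvA_bt bb) c) = PySem.List.len bb) ↔ pvOK bb c = true := by
  rw [pv_bt_eq, pv_result_eq, List.map_map, pv_c_eq, PySem.List.len_eq]
  rw [show ((bb.countP _ : Nat) : Int) = _ ↔ _ from Int.natCast_inj]
  rw [List.countP_eq_length]
  unfold pvOK
  rw [List.all_eq_true]
  constructor <;>
  · intro h r hr
    have := h r hr
    simpa [pvG] using this

-- A's answer is a count over pvA_temp
set_option maxRecDepth 10000 in
theorem pv_sol_count (bb : List (List Int)) :
    solution bb = (pvA_temp.countP (pvOK bb) : Int) := by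
  simp only [solution]
  have h : (fun (ans : Int) i =>
        if pvA_c bb (pvA_result (pvA_bt bb) i) = PySem.List.len bb then ans + 1 else ans)
      = (fun (ans : Int) i => if pvOK bb i = true then ans + 1 else ans) := by
    funext ans i
    rw [if_congr (pv_cond_iff bb i) rfl rfl]
  rw [h, PySem.List.foldl_if_add_one]
  simp

def pvPosOK (t : List Char) (p : Int) (k : Char) (c : List Char) (d : Char) : Prop :=
  if k = 'S' then d = PySem.List.pyGetD t p ' ' ∧ d ∈ pvDigitsB ∧ d ∉ c
  else if k = 'B' then d ∈ pvDigitsB ∧ d ∈ t ∧ d ≠ PySem.List.pyGetD t p ' ' ∧ d ∉ c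
  else d ∈ pvDigitsB ∧ d ∉ t ∧ d ∉ c

theorem pv_step_mem (t pat : List Char) (P : List (List Char)) (p : Int) (x : List Char) :
    x ∈ pvGenStep t pat P p ↔
      ∃ c ∈ P, ∃ d, pvPosOK t p (PySem.List.pyGetD pat p ' ') c d ∧ x = c ++ [d] := by
  unfold pvGenStep pvPosOK
  by_cases h1 : PySem.List.pyGetD pat p ' ' = 'S'
  · simp only [if_pos h1, List.mem_flatMap, List.mem_ite_nil_right, List.mem_singleton]
    constructor
    · rintro ⟨c, hc, h, rfl⟩
      exact ⟨c, hc, _, ⟨rfl, h.1, h.2⟩, rfl⟩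
    · rintro ⟨c, hc, d, ⟨rfl, h2, h3⟩, rfl⟩
      exact ⟨c, hc, ⟨h2, h3⟩, rfl⟩
  by_cases h2 : PySem.List.pyGetD pat p ' ' = 'B'
  · simp only [if_neg h1, if_pos h2, List.mem_flatMap, List.mem_ite_nil_right, List.mem_singleton]
    constructor
    · rintro ⟨c, hc, d, hd, h, rfl⟩
      exact ⟨c, hc, d, ⟨hd, h.1, h.2.1, h.2.2⟩, rfl⟩
    · rintro ⟨c, hc, d, ⟨hd1, hd2, hd3, hd4⟩, rfl⟩
      exact ⟨c, hc, d, hd1, ⟨hd2, hd3, hd4⟩, rfl⟩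
  · simp only [if_neg h1, if_neg h2, List.mem_flatMap, List.mem_ite_nil_right, List.mem_singleton]
    constructor
    · rintro ⟨c, hc, d, hd, h, rfl⟩
      exact ⟨c, hc, d, ⟨hd, h.1, h.2⟩, rfl⟩
    · rintro ⟨c, hc, d, ⟨hd1, hd2, hd3⟩, rfl⟩
      exact ⟨c, hc, d, hd1, ⟨hd2, hd3⟩, rfl⟩

theorem pv_partials_mem (t pat : List Char) (x : List Char) :
    x ∈ (PySem.List.pyRange 0 3 1).foldl (pvGenStep t pat) [[]] ↔
      ∃ d0 d1 d2, pvPosOK t 0 (PySem.List.pyGetD pat 0 ' ') [] d0 ∧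
        pvPosOK t 1 (PySem.List.pyGetD pat 1 ' ') [d0] d1 ∧
        pvPosOK t 2 (PySem.List.pyGetD pat 2 ' ') [d0, d1] d2 ∧ x = [d0, d1, d2] := by
  have h3 : PySem.List.pyRange 0 (3:Int) 1 = [0, 1, 2] := by decide
  rw [h3]
  simp only [List.foldl_cons, List.foldl_nil, pv_step_mem, List.mem_singleton]
  constructor
  · rintro ⟨c2, ⟨c1, ⟨c0, rfl, d0, h0, rfl⟩, d1, h1, rfl⟩, d2, h2, rfl⟩
    exact ⟨d0, d1, d2, h0, by simpa using h1, by simpa using h2, by simp⟩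
  · rintro ⟨d0, d1, d2, h0, h1, h2, rfl⟩
    exact ⟨[d0, d1], ⟨[d0], ⟨[], rfl, d0, h0, rfl⟩, d1, by simpa using h1, by simp⟩,
           d2, by simpa using h2, by simp⟩

def pvCat (t : List Char) (p : Int) (d : Char) : Char :=
  if d = PySem.List.pyGetD t p ' ' then 'S' else if d ∈ t then 'B' else 'O'

theorem pv_cat_mem (t : List Char) (p : Int) (d : Char) : pvCat t p d ∈ (['S','B','O'] : List Char) := by
  unfold pvCat; split_ifs <;> simp

theorem pv_posok_iff (t : List Char) (p : Int) (k : Char) (c : List Char) (d : Char)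
    (ht : 3 ≤ t.length) (hp0 : 0 ≤ p) (hp3 : p < 3) (hk : k ∈ (['S','B','O'] : List Char)) :
    pvPosOK t p k c d ↔ d ∈ pvDigitsB ∧ d ∉ c ∧ k = pvCat t p d := by
  have htp : PySem.List.pyGetD t p ' ' ∈ t := by
    apply PySem.List.pyGetD_mem
    constructor <;> omega
  unfold pvPosOK pvCat
  simp only [List.mem_cons, List.not_mem_nil, or_false] at hk
  rcases hk with rfl | rfl | rfl <;>
    by_cases h1 : d = PySem.List.pyGetD t p ' ' <;>
      by_cases h2 : d ∈ t <;>
        simp [h1, h2] <;> tauto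

theorem pv_sb_eval (d0 d1 d2 t0 t1 t2 : Char) (rest : List Char) :
    pvA_sb [d0, d1, d2] (t0 :: t1 :: t2 :: rest) =
      ((if d0 = t0 then 1 else 0) + (if d1 = t1 then 1 else 0) + (if d2 = t2 then 1 else 0),
       (if d0 ≠ t0 ∧ d0 ∈ t0 :: t1 :: t2 :: rest then 1 else 0) +
       (if d1 ≠ t1 ∧ d1 ∈ t0 :: t1 :: t2 :: rest then 1 else 0) +
       (if d2 ≠ t2 ∧ d2 ∈ t0 :: t1 :: t2 :: rest then 1 else 0)) := by
  have hlen : PySem.List.len [d0, d1, d2] = 3 := by simp [PySem.List.len_eq]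
  have h3 : PySem.List.pyRange 0 (3:Int) 1 = [0, 1, 2] := by decide
  rw [pvA_sb, hlen, h3]
  simp only [List.foldl_cons, List.foldl_nil, PySem.List.pyGetD_ofNat', List.getD_cons_succ,
    List.getD_cons_zero, List.contains_iff_mem]
  by_cases e0 : d0 = t0 <;> by_cases e1 : d1 = t1 <;> by_cases e2 : d2 = t2 <;>
    by_cases m0 : d0 ∈ t0 :: t1 :: t2 :: rest <;> by_cases m1 : d1 ∈ t0 :: t1 :: t2 :: rest <;>
      by_cases m2 : d2 ∈ t0 :: t1 :: t2 :: rest <;>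
        simp_all

theorem pv_count3 (k0 k1 k2 v : Char) :
    PySem.List.count [k0, k1, k2] v =
      (if k0 = v then (1:Int) else 0) + (if k1 = v then 1 else 0) + (if k2 = v then 1 else 0) := by
  by_cases h0 : k0 = v <;> by_cases h1 : k1 = v <;> by_cases h2 : k2 = v <;>
    simp [PySem.List.count_eq, h0, h1, h2]

theorem pv_cat_S (t : List Char) (p : Int) (d : Char) :
    pvCat t p d = 'S' ↔ d = PySem.List.pyGetD t p ' ' := by
  unfold pvCat; split_ifs <;> simp_all

theorem pv_cat_B (t : List Char) (p : Int) (d : Char)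
    (htp : PySem.List.pyGetD t p ' ' ∈ t) :
    pvCat t p d = 'B' ↔ d ≠ PySem.List.pyGetD t p ' ' ∧ d ∈ t := by
  unfold pvCat
  by_cases h1 : d = PySem.List.pyGetD t p ' '
  · subst h1; simp [htp]
  · by_cases h2 : d ∈ t <;> simp [h1, h2]

theorem pv_sb_eval' (d0 d1 d2 : Char) (t : List Char) (ht : 3 ≤ t.length) :
    pvA_sb [d0, d1, d2] t =
      ((if d0 = PySem.List.pyGetD t 0 ' ' then 1 else 0) +
       (if d1 = PySem.List.pyGetD t 1 ' ' then 1 else 0) +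
       (if d2 = PySem.List.pyGetD t 2 ' ' then 1 else 0),
       (if d0 ≠ PySem.List.pyGetD t 0 ' ' ∧ d0 ∈ t then 1 else 0) +
       (if d1 ≠ PySem.List.pyGetD t 1 ' ' ∧ d1 ∈ t then 1 else 0) +
       (if d2 ≠ PySem.List.pyGetD t 2 ' ' ∧ d2 ∈ t then 1 else 0)) := by
  obtain ⟨t0, t1, t2, rest, rfl⟩ : ∃ a b c r, t = a :: b :: c :: r := by
    rcases t with _|⟨a,_|⟨b,_|⟨c,r⟩⟩⟩ <;> first
      | exact ⟨a, b, c, r, rfl⟩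
      | (exfalso; simp at ht)
  rw [pv_sb_eval]
  simp [PySem.List.pyGetD_ofNat']

theorem pv_tp_mem (t : List Char) (p : Int) (ht : 3 ≤ t.length) (hp0 : 0 ≤ p) (hp3 : p < 3) :
    PySem.List.pyGetD t p ' ' ∈ t := by
  apply PySem.List.pyGetD_mem
  constructor <;> omega

theorem pv_counts_of_pat (t : List Char) (d0 d1 d2 : Char) (ht : 3 ≤ t.length) :
    ((PySem.List.count [pvCat t 0 d0, pvCat t 1 d1, pvCat t 2 d2] 'S' : Int),
     (PySem.List.count [pvCat t 0 d0, pvCat t 1 d1, pvCat t 2 d2] 'B' : Int)) =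
      pvA_sb [d0, d1, d2] t := by
  rw [pv_sb_eval' d0 d1 d2 t ht, pv_count3, pv_count3]
  exact congrArg₂ Prod.mk
    (congrArg₂ (fun a b : Int => a + b) (congrArg₂ (fun a b : Int => a + b)
      (if_congr (pv_cat_S t 0 d0) rfl rfl) (if_congr (pv_cat_S t 1 d1) rfl rfl))
      (if_congr (pv_cat_S t 2 d2) rfl rfl))
    (congrArg₂ (fun a b : Int => a + b) (congrArg₂ (fun a b : Int => a + b)
      (if_congr (pv_cat_B t 0 d0 (pv_tp_mem t 0 ht (by omega) (by omega))) rfl rfl)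
      (if_congr (pv_cat_B t 1 d1 (pv_tp_mem t 1 ht (by omega) (by omega))) rfl rfl))
      (if_congr (pv_cat_B t 2 d2 (pv_tp_mem t 2 ht (by omega) (by omega))) rfl rfl))

theorem pv_gen_fold_mem (t : List Char) (s b : Int) (ps : List (List Char))
    (acc : PySem.Set (List Char)) (x : List Char) :
    x ∈ ps.foldl (pvGenStepOuter t s b) acc ↔
      x ∈ acc ∨ ∃ pat ∈ ps, ((PySem.List.count pat 'S' : Int) = s ∧
        (PySem.List.count pat 'B' : Int) = b) ∧
        x ∈ (PySem.List.pyRange 0 3 1).foldl (pvGenStep t pat) [[]] := by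
  induction ps generalizing acc with
  | nil => simp
  | cons q qs ih =>
    simp only [List.foldl_cons]
    rw [ih]
    unfold pvGenStepOuter
    by_cases h : (PySem.List.count q 'S' : Int) ≠ s ∨ (PySem.List.count q 'B' : Int) ≠ b
    · rw [if_pos h]
      simp only [List.exists_mem_cons_iff]
      constructor
      · rintro (h1 | h2)
        · exact Or.inl h1
        · exact Or.inr (Or.inr h2)
      · rintro (h1 | ⟨hq, _⟩ | h2)
        · exact Or.inl h1
        · exact absurd hq.1 (by tauto)
        · exact Or.inr h2
    · rw [if_neg h]
      push Not at h
      simp only [PySem.Set.mem_update, List.exists_mem_cons_iff]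
      tauto

theorem pv_gen_fold_nodup (t : List Char) (s b : Int) (ps : List (List Char))
    (acc : PySem.Set (List Char)) (hacc : acc.Nodup) :
    (ps.foldl (pvGenStepOuter t s b) acc).Nodup := by
  induction ps generalizing acc with
  | nil => simpa using hacc
  | cons q qs ih =>
    simp only [List.foldl_cons]
    unfold pvGenStepOuter
    by_cases h : (PySem.List.count q 'S' : Int) ≠ s ∨ (PySem.List.count q 'B' : Int) ≠ b
    · rw [if_pos h]; exact ih _ hacc
    · rw [if_neg h]; exact ih _ (PySem.Set.nodup_update _ _ hacc)

theorem pv_pats_mem_iff (pat : List Char) :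
    pat ∈ pvPats ↔ ∃ k0 k1 k2, k0 ∈ (['S','B','O'] : List Char) ∧
      k1 ∈ (['S','B','O'] : List Char) ∧ k2 ∈ (['S','B','O'] : List Char) ∧ pat = [k0, k1, k2] := by
  simp only [pvPats, List.mem_flatMap, List.mem_map]
  constructor
  · rintro ⟨k0, h0, k1, h1, k2, h2, rfl⟩
    exact ⟨k0, k1, k2, h0, h1, h2, rfl⟩
  · rintro ⟨k0, k1, k2, h0, h1, h2, rfl⟩
    exact ⟨k0, h0, k1, h1, k2, h2, rfl⟩

theorem pv_get3_0 (a b c x : Char) : PySem.List.pyGetD [a, b, c] (0:Int) x = a := by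
  simp [PySem.List.pyGetD_ofNat']
theorem pv_get3_1 (a b c x : Char) : PySem.List.pyGetD [a, b, c] (1:Int) x = b := by
  simp [PySem.List.pyGetD_ofNat']
theorem pv_get3_2 (a b c x : Char) : PySem.List.pyGetD [a, b, c] (2:Int) x = c := by
  simp [PySem.List.pyGetD_ofNat']

theorem pv_gen_mem (t : List Char) (s b : Int) (x : List Char) (ht : 3 ≤ t.length) :
    x ∈ pvGen t s b ↔
      (∃ d0 d1 d2, x = [d0, d1, d2] ∧ d0 ∈ pvDigitsB ∧ d1 ∈ pvDigitsB ∧ d2 ∈ pvDigitsB ∧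
        d1 ≠ d0 ∧ d2 ≠ d0 ∧ d2 ≠ d1) ∧ (pvA_sb x t).1 = s ∧ (pvA_sb x t).2 = b := by
  have hfold : pvGen t s b = pvPats.foldl (pvGenStepOuter t s b) PySem.Set.empty := rfl
  rw [hfold, pv_gen_fold_mem]
  constructor
  · rintro (h | ⟨pat, hp, ⟨hgs, hgb⟩, hx⟩)
    · simp [PySem.Set.empty] at h
    · obtain ⟨k0, k1, k2, m0, m1, m2, rfl⟩ := (pv_pats_mem_iff pat).mp hp
      rw [pv_partials_mem] at hx
      obtain ⟨d0, d1, d2, h0, h1, h2, rfl⟩ := hx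
      rw [pv_get3_0] at h0; rw [pv_get3_1] at h1; rw [pv_get3_2] at h2
      obtain ⟨hd0, -, hk0⟩ := (pv_posok_iff t 0 k0 [] d0 ht (by omega) (by omega) m0).mp h0
      obtain ⟨hd1, hn1, hk1⟩ := (pv_posok_iff t 1 k1 [d0] d1 ht (by omega) (by omega) m1).mp h1
      obtain ⟨hd2, hn2, hk2⟩ := (pv_posok_iff t 2 k2 [d0, d1] d2 ht (by omega) (by omega) m2).mp h2
      subst hk0; subst hk1; subst hk2
      have hc := pv_counts_of_pat t d0 d1 d2 ht
      refine ⟨⟨d0, d1, d2, rfl, hd0, hd1, hd2, by simpa using hn1,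
        fun h => hn2 (by simp [h]), fun h => hn2 (by simp [h])⟩, ?_, ?_⟩
      · rw [← congrArg Prod.fst hc]; exact hgs
      · rw [← congrArg Prod.snd hc]; exact hgb
  · rintro ⟨⟨d0, d1, d2, rfl, hd0, hd1, hd2, hn10, hn20, hn21⟩, hs, hb⟩
    right
    have hc := pv_counts_of_pat t d0 d1 d2 ht
    refine ⟨[pvCat t 0 d0, pvCat t 1 d1, pvCat t 2 d2], ?_, ⟨?_, ?_⟩, ?_⟩
    · exact (pv_pats_mem_iff _).mpr ⟨_, _, _, pv_cat_mem t 0 d0, pv_cat_mem t 1 d1,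
        pv_cat_mem t 2 d2, rfl⟩
    · rw [← hc] at hs; simpa using hs
    · rw [← hc] at hb; simpa using hb
    · rw [pv_partials_mem]
      refine ⟨d0, d1, d2, ?_, ?_, ?_, rfl⟩
      · rw [pv_get3_0]
        exact (pv_posok_iff t 0 _ [] d0 ht (by omega) (by omega) (pv_cat_mem t 0 d0)).mpr
          ⟨hd0, by simp, rfl⟩
      · rw [pv_get3_1]
        exact (pv_posok_iff t 1 _ [d0] d1 ht (by omega) (by omega) (pv_cat_mem t 1 d1)).mpr
          ⟨hd1, by simpa using hn10, rfl⟩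
      · rw [pv_get3_2]
        exact (pv_posok_iff t 2 _ [d0, d1] d2 ht (by omega) (by omega) (pv_cat_mem t 2 d2)).mpr
          ⟨hd2, by simp [hn20, hn21], rfl⟩

theorem pv_gen_nodup (t : List Char) (s b : Int) : (pvGen t s b).Nodup := by
  have hfold : pvGen t s b = pvPats.foldl (pvGenStepOuter t s b) PySem.Set.empty := rfl
  rw [hfold]
  exact pv_gen_fold_nodup t s b pvPats PySem.Set.empty (by simp [PySem.Set.empty])

def pvTriples : List (List Char) :=
  pvDigitsB.flatMap (fun a => pvDigitsB.flatMap (fun b => pvDigitsB.map (fun c => [a, b, c])))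

def pvKeep : List Char → Bool
  | [a, b, c] => !(a = b ∨ a = c ∨ b = c)
  | _ => false

set_option maxRecDepth 40000 in
set_option maxHeartbeats 2000000 in
theorem pv_hAT : pvA_temp = pvTriples.filter pvKeep := by decide

set_option maxRecDepth 40000 in
theorem pv_len504 : (pvTriples.filter pvKeep).length = 504 := by decide

theorem pv_digits_nodup : pvDigitsB.Nodup := by decide

theorem pv_triples_nodup : pvTriples.Nodup := by
  unfold pvTriples
  rw [List.nodup_flatMap]
  refine ⟨fun a _ => ?_, ?_⟩
  · rw [List.nodup_flatMap]
    refine ⟨fun b _ => List.Nodup.map (fun c c' h => by simpa using h) pv_digits_nodup, ?_⟩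
    refine List.Pairwise.imp (fun hne => ?_) pv_digits_nodup
    rename_i b b'
    rw [Function.onFun, List.disjoint_left]
    rintro z hz hz'
    simp only [List.mem_map] at hz hz'
    obtain ⟨c, -, rfl⟩ := hz
    obtain ⟨c', -, h⟩ := hz'
    have hb : b' = b := by
      have h1 := congrArg (fun l : List Char => l[1]?) h
      simpa using h1
    exact hne hb.symm
  · refine List.Pairwise.imp (fun hne => ?_) pv_digits_nodup
    rename_i a a'
    rw [Function.onFun, List.disjoint_left]
    rintro z hz hz'
    simp only [List.mem_flatMap, List.mem_map] at hz hz'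
    obtain ⟨b, -, c, -, rfl⟩ := hz
    obtain ⟨b', -, c', -, h⟩ := hz'
    have ha : a' = a := by
      have h1 := congrArg (fun l : List Char => l[0]?) h
      simpa using h1
    exact hne ha.symm

theorem pv_temp_nodup : pvA_temp.Nodup := by
  rw [pv_hAT]; exact pv_triples_nodup.filter _

theorem pv_temp_mem_iff (x : List Char) :
    x ∈ pvA_temp ↔ ∃ d0 d1 d2, x = [d0, d1, d2] ∧ d0 ∈ pvDigitsB ∧ d1 ∈ pvDigitsB ∧
      d2 ∈ pvDigitsB ∧ d1 ≠ d0 ∧ d2 ≠ d0 ∧ d2 ≠ d1 := by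
  rw [pv_hAT, List.mem_filter]
  unfold pvTriples
  simp only [List.mem_flatMap, List.mem_map]
  constructor
  · rintro ⟨⟨a, ha, b, hb, c, hc, rfl⟩, hkeep⟩
    refine ⟨a, b, c, rfl, ha, hb, hc, ?_, ?_, ?_⟩ <;>
      (simp only [pvKeep] at hkeep; intro h; subst h; simp at hkeep)
  · rintro ⟨d0, d1, d2, rfl, h0, h1, h2, n10, n20, n21⟩
    refine ⟨⟨d0, h0, d1, h1, d2, h2, rfl⟩, ?_⟩
    simp only [pvKeep]
    simp [Ne.symm n10, Ne.symm n20, n21.symm]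

-- ---------- B-side counting ----------
def pvGenOf (r : List Int) : PySem.Set (List Char) :=
  pvGen (pvG r) (PySem.List.pyGetD r 1 0) (PySem.List.pyGetD r 2 0)

theorem pv_alt_fold (qs : List (List Int)) (S : PySem.Set (List Char)) :
    qs.foldl pvB_step (some S) =
      some (qs.foldl (fun S q => PySem.Set.inter S (pvGenOf q)) S) := by
  induction qs generalizing S with
  | nil => rfl
  | cons q qs ih =>
    simp only [List.foldl_cons]
    rw [show pvB_step (some S) q = some (PySem.Set.inter S (pvGenOf q)) from rfl, ih]

theorem pv_interfold_mem (qs : List (List Int)) (S : PySem.Set (List Char)) (x : List Char) :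
    x ∈ qs.foldl (fun S q => PySem.Set.inter S (pvGenOf q)) S ↔
      x ∈ S ∧ ∀ q ∈ qs, x ∈ pvGenOf q := by
  induction qs generalizing S with
  | nil => simp
  | cons q qs ih =>
    simp only [List.foldl_cons]
    rw [ih, PySem.Set.mem_inter]
    simp only [List.forall_mem_cons]
    tauto

theorem pv_interfold_nodup (qs : List (List Int)) (S : PySem.Set (List Char)) (hS : S.Nodup) :
    (qs.foldl (fun S q => PySem.Set.inter S (pvGenOf q)) S).Nodup := by
  induction qs generalizing S with
  | nil => simpa using hS
  | cons q qs ih =>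
    simp only [List.foldl_cons]
    exact ih _ (PySem.Set.nodup_inter _ _ hS)

theorem pv_genOf_mem (r : List Int) (x : List Char) (ht : 3 ≤ (pvG r).length) :
    x ∈ pvGenOf r ↔ x ∈ pvA_temp ∧
      ((pvA_sb x (pvG r)).1 = PySem.List.pyGetD r 1 0 ∧
       (pvA_sb x (pvG r)).2 = PySem.List.pyGetD r 2 0) := by
  rw [pvGenOf, pv_gen_mem _ _ _ _ ht, pv_temp_mem_iff]

theorem pv_alt_count (q : List Int) (qs : List (List Int))
    (hPre : ∀ r ∈ q :: qs, 3 ≤ (pvG r).length) :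
    solution_alt (q :: qs) = (pvA_temp.countP (pvOK (q :: qs)) : Int) := by
  rw [solution_alt, List.foldl_cons,
    show pvB_step none q = some (pvGenOf q) from rfl, pv_alt_fold]
  rw [show (match some (qs.foldl (fun S q => PySem.Set.inter S (pvGenOf q)) (pvGenOf q)) with
      | none => (9 * 8 * 7 : Int)
      | some s => PySem.Set.len s) =
    PySem.Set.len (qs.foldl (fun S q => PySem.Set.inter S (pvGenOf q)) (pvGenOf q)) from rfl]
  have hmem : ∀ x, x ∈ qs.foldl (fun S q => PySem.Set.inter S (pvGenOf q)) (pvGenOf q) ↔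
      x ∈ pvA_temp.filter (pvOK (q :: qs)) := by
    intro x
    rw [pv_interfold_mem, List.mem_filter]
    constructor
    · rintro ⟨hq, hqs⟩
      obtain ⟨hT, hcq⟩ := (pv_genOf_mem q x (hPre q (by simp))).mp hq
      refine ⟨hT, ?_⟩
      unfold pvOK
      rw [List.all_eq_true]
      intro r hr
      rcases List.mem_cons.mp hr with rfl | hr'
      · simpa using hcq
      · simpa using ((pv_genOf_mem r x (hPre r (List.mem_cons_of_mem _ hr'))).mp (hqs r hr')).2
    · rintro ⟨hT, hOK⟩
      unfold pvOK at hOK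
      rw [List.all_eq_true] at hOK
      refine ⟨(pv_genOf_mem q x (hPre q (by simp))).mpr ⟨hT, by simpa using hOK q (by simp)⟩,
        fun r hr => (pv_genOf_mem r x (hPre r (List.mem_cons_of_mem _ hr))).mpr
          ⟨hT, by simpa using hOK r (List.mem_cons_of_mem _ hr)⟩⟩
  have hperm : (qs.foldl (fun S q => PySem.Set.inter S (pvGenOf q)) (pvGenOf q)).Perm
      (pvA_temp.filter (pvOK (q :: qs))) :=
    (List.perm_ext_iff_of_nodup
      (pv_interfold_nodup qs _ (pv_gen_nodup _ _ _))
      (pv_temp_nodup.filter _)).mpr hmem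
  rw [show PySem.Set.len (qs.foldl (fun S q => PySem.Set.inter S (pvGenOf q)) (pvGenOf q)) =
    ((qs.foldl (fun S q => PySem.Set.inter S (pvGenOf q)) (pvGenOf q)).length : Int) from rfl]
  rw [hperm.length_eq, ← List.countP_eq_length_filter]


theorem pv_main (bb : List (List Int)) (hPre : Pre_solution bb) :
    solution bb = solution_alt bb := by
  rw [pv_sol_count]
  cases bb with
  | nil =>
    rw [show solution_alt [] = (9 * 8 * 7 : Int) from rfl]
    have h1 : pvA_temp.countP (pvOK []) = pvA_temp.length := by
      apply List.countP_eq_length.mpr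
      intro x hx
      simp [pvOK]
    rw [h1, pv_hAT, pv_len504]
    norm_num
  | cons q qs =>
    rw [pv_alt_count q qs (fun r hr => (hPre r hr).2)]

-- ===== VERDICT (by name: the statement is the Claim_ definition above) =====
theorem solution_spec : Claim_equal_solution := by
  intro bb hDom hPre
  show solution bb = solution_alt bb
  exact pv_main bb hPre
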